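-- pv_equiv track=rewrite | github.com/sheendevelops/FlexibleClusterAnalysis | utils/emotion_detector.py | _words_are_close
-- ===== SOURCE A (Python) =====
-- def _words_are_close(text: str, word1: str, word2: str, max_distance: int = 3) -> bool:
--     """
--     Check if two words appear close to each other in text
--     """
--     words = text.split()
--
--     try:
--         pos1 = next(i for i, word in enumerate(words) if word1 in word)
--         pos2 = next(i for i, word in enumerate(words) if word2 in word)
--         return abs(pos1 - pos2) <= max_distance
--     except StopIteration:
--         return False
-- ===== SOURCE B (Python) =====
-- def _words_are_close(text: str, word1: str, word2: str, max_distance: int = 3) -> bool: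
--     """Find whichever word occurs first, then measure the gap forward to the other:
--     no absolute positions and no abs() are ever computed."""
--     tokens = text.split()
--     for k, tok in enumerate(tokens):
--         has1 = word1 in tok
--         has2 = word2 in tok
--         if has1 or has2:
--             if has1 and has2:
--                 return 0 <= max_distance
--             other = word2 if has1 else word1
--             gap = 1
--             for tok2 in tokens[k + 1:]:
--                 if other in tok2:
--                     return gap <= max_distance
--                 gap += 1
--             return False
--     return False
-- ===== Notes on version B (the rewrite author's own statement) =====
-- stated objective: alternative
-- what changed: Instead of computing the two absolute first-match indices and comparing abs(pos1-pos2), B scans once for whichever word occurs first and then counts the forward gap to the other word, returning gap <= max_distance; no indices or abs are computed.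
import Mathlib
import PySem

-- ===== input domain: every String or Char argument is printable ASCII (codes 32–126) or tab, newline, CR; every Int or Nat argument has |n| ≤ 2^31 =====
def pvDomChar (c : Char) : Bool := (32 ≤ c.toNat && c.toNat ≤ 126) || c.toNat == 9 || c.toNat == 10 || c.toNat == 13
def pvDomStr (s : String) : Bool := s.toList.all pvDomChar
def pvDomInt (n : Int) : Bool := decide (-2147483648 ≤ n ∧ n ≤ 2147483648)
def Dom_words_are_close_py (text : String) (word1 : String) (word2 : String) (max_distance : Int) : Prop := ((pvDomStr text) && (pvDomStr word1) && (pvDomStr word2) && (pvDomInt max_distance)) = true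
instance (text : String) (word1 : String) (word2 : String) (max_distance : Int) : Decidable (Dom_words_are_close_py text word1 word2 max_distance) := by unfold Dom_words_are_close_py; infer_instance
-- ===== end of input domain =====

-- B replaces A's two absolute first-index scans + abs comparison by a gap count:
-- find whichever word occurs first, then count tokens forward to the other word
-- (objective: alternative algorithm, same cost).
-- ===== PORT A =====
-- next(i for i, word in enumerate(words) if w in word): first index whose token contains w
def pvFirstMatch (w : String) : List String → Int → Option Int
  | [], _ => none
  | x :: xs, i => if PySem.Str.isIn w x then some i else pvFirstMatch w xs (i + 1)

def words_are_close_py (text : String) (word1 : String) (word2 : String) (max_distance : Int) : Bool :=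
  let words := PySem.Str.split₀ text
  match pvFirstMatch word1 words 0, pvFirstMatch word2 words 0 with
  | some p1, some p2 => decide (|p1 - p2| ≤ max_distance)
  | _, _ => false

-- ===== PORT B =====
-- inner loop of Source B: count the forward gap until a token contains `other`
def pvGapTo (other : String) (md : Int) : List String → Int → Bool
  | [], _ => false
  | x :: xs, g => if PySem.Str.isIn other x then decide (g ≤ md) else pvGapTo other md xs (g + 1)

-- outer loop of Source B: scan for the first token containing word1 or word2
def pvFirstEither (w1 w2 : String) (md : Int) : List String → Bool
  | [] => false
  | x :: xs =>
    let has1 := PySem.Str.isIn w1 x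
    let has2 := PySem.Str.isIn w2 x
    if has1 || has2 then
      if has1 && has2 then decide ((0 : Int) ≤ md)
      else pvGapTo (if has1 then w2 else w1) md xs 1
    else pvFirstEither w1 w2 md xs

def words_are_close_py_alt (text : String) (word1 : String) (word2 : String) (max_distance : Int) : Bool :=
  pvFirstEither word1 word2 max_distance (PySem.Str.split₀ text)

-- ===== PRECONDITION & SPEC =====
def Spec_words_are_close_py (text : String) (word1 : String) (word2 : String) (max_distance : Int) (out : Bool) : Prop := out = words_are_close_py_alt text word1 word2 max_distance
instance (text : String) (word1 : String) (word2 : String) (max_distance : Int) (out : Bool) : Decidable (Spec_words_are_close_py text word1 word2 max_distance out) := by unfold Spec_words_are_close_py; infer_instance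

-- ===== CLAIM =====
def Claim_equal_words_are_close_py : Prop := ∀ (text : String) (word1 : String) (word2 : String) (max_distance : Int), Dom_words_are_close_py text word1 word2 max_distance → Spec_words_are_close_py text word1 word2 max_distance (words_are_close_py text word1 word2 max_distance)

-- ===== LEMMAS AND PROOFS =====
theorem pvFirstMatch_shift (w : String) (ws : List String) (i : Int) :
    pvFirstMatch w ws i = (pvFirstMatch w ws 0).map (· + i) := by
  induction ws generalizing i with
  | nil => simp [pvFirstMatch]
  | cons x xs ih =>
    simp only [pvFirstMatch]
    split_ifs with h
    · simp
    · rw [zero_add, ih (i + 1), ih 1]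
      cases pvFirstMatch w xs 0 with
      | none => simp
      | some p => simp; ring

theorem pvFirstMatch_nonneg (w : String) (ws : List String) (i p : Int)
    (hi : 0 ≤ i) (h : pvFirstMatch w ws i = some p) : i ≤ p := by
  induction ws generalizing i with
  | nil => simp [pvFirstMatch] at h
  | cons x xs ih =>
    simp only [pvFirstMatch] at h
    split_ifs at h with hx
    · simp only [Option.some.injEq] at h; omega
    · have := ih (i + 1) (by omega) h; omega

theorem pvGapTo_eq (other : String) (md : Int) (xs : List String) (g : Int) :
    pvGapTo other md xs g =
      (match pvFirstMatch other xs 0 with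
       | some p => decide (g + p ≤ md)
       | none => false) := by
  induction xs generalizing g with
  | nil => simp [pvGapTo, pvFirstMatch]
  | cons x xs ih =>
    simp only [pvGapTo, pvFirstMatch]
    split_ifs with h
    · simp
    · rw [zero_add, ih (g + 1), pvFirstMatch_shift other xs 1]
      cases pvFirstMatch other xs 0 with
      | none => simp
      | some p => simp; omega

theorem pvFirstEither_eq (w1 w2 : String) (md : Int) (ws : List String) :
    pvFirstEither w1 w2 md ws =
      (match pvFirstMatch w1 ws 0, pvFirstMatch w2 ws 0 with
       | some p1, some p2 => decide (|p1 - p2| ≤ md)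
       | _, _ => false) := by
  induction ws with
  | nil => simp [pvFirstEither, pvFirstMatch]
  | cons x xs ih =>
    simp only [pvFirstEither, pvFirstMatch, PySem.Str.isIn_eq, zero_add]
    rcases Bool.eq_false_or_eq_true (PySem.Chars.isIn w1.toList x.toList) with h1 | h1 <;>
      rcases Bool.eq_false_or_eq_true (PySem.Chars.isIn w2.toList x.toList) with h2 | h2 <;>
        simp only [h1, h2, Bool.or_self, Bool.or_true, Bool.true_or,
          Bool.false_and, Bool.true_and, Bool.and_true, Bool.false_eq_true, if_false, if_true]
    · -- both in the same token: distance 0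
      simp
    · -- word1 only: p1 = 0, the gap counts to the first w2 match
      rw [pvGapTo_eq, pvFirstMatch_shift w2 xs 1]
      cases hp : pvFirstMatch w2 xs 0 with
      | none => simp
      | some p =>
        have hnn : 0 ≤ p := pvFirstMatch_nonneg w2 xs 0 p le_rfl hp
        simp only [Option.map_some, decide_eq_decide]
        rw [abs_of_nonpos (by omega)]
        omega
    · -- word2 only: p2 = 0, the gap counts to the first w1 match
      rw [pvGapTo_eq, pvFirstMatch_shift w1 xs 1]
      cases hp : pvFirstMatch w1 xs 0 with
      | none => simp
      | some p =>
        have hnn : 0 ≤ p := pvFirstMatch_nonneg w1 xs 0 p le_rfl hp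
        simp only [Option.map_some, decide_eq_decide]
        rw [abs_of_nonneg (by omega)]
        omega
    · -- neither token contains a word: shift both first matches by 1
      rw [ih, pvFirstMatch_shift w1 xs 1, pvFirstMatch_shift w2 xs 1]
      cases pvFirstMatch w1 xs 0 with
      | none => cases pvFirstMatch w2 xs 0 <;> simp
      | some p1 =>
        cases pvFirstMatch w2 xs 0 with
        | none => simp
        | some p2 =>
          simp only [Option.map_some]
          rw [show p1 + 1 - (p2 + 1) = p1 - p2 from by ring]
-- ===== VERDICT =====
theorem words_are_close_py_spec : Claim_equal_words_are_close_py := by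
  intro text word1 word2 max_distance _
  unfold Spec_words_are_close_py words_are_close_py words_are_close_py_alt
  rw [pvFirstEither_eq]
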